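-- pv_equiv track=rewrite | github.com/Sathish8472/DSA-Problems | 1537-maximum-score-after-splitting-a-string/1537-maximum-score-after-splitting-a-string.py | maxScore2
-- ===== SOURCE A (Python) =====
-- def maxScore2(s: str) -> int:
--     total_ones = s.count("1")  # Count total number of 1s in the string
--     left_zeros = 0
--     max_score = 0
--
--     for i in range(len(s) - 1):  # Split at index i (not including last character)
--         if s[i] == "0":
--             left_zeros += 1
--         else:
--             total_ones -= 1  # Removing 1 from right part
--
--         max_score = max(max_score, left_zeros + total_ones)
--
--     return max_score
-- ===== SOURCE B (Python) =====
-- def maxScore2(s: str) -> int: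
--     # Divide and conquer: summarise each segment by (diff, best) where
--     # diff = zeros - non-zeros over the segment and best = max of diff over
--     # its non-empty prefixes; merge two summaries in O(1).
--     if len(s) < 2:
--         return 0
--
--     def solve(t):
--         if len(t) == 1:
--             d = 1 if t == "0" else -1
--             return d, d
--         mid = len(t) // 2
--         dl, ml = solve(t[:mid])
--         dr, mr = solve(t[mid:])
--         return dl + dr, max(ml, dl + mr)
--
--     d, m = solve(s[:-1])
--     return max(0, s.count("1") + m)
-- ===== Notes on version B (the rewrite author's own statement) =====
-- stated objective: alternative
-- what changed: Replaces A's single left-to-right pass with incremental left/right counters by a divide-and-conquer recursion: each segment is summarised by (zeros-minus-nonzeros diff, best prefix diff), summaries of halves are merged in O(1), and the answer is max(0, total_ones + best prefix diff of s[:-1]).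
import Mathlib
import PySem

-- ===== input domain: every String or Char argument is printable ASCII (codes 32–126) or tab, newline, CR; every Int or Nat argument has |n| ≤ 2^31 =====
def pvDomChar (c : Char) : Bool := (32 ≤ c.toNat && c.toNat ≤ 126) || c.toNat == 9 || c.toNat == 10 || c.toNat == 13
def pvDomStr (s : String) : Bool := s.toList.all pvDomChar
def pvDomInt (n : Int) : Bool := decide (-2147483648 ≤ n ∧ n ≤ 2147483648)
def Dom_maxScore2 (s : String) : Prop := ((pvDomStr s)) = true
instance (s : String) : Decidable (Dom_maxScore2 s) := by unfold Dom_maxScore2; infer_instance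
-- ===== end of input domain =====

-- B replaces A's incremental counter loop by divide and conquer on segment summaries (a different algorithm, similar cost).

-- ===== PORT A =====
def maxScore2 (s : String) : Int :=
  let cs := s.toList
  let st := (PySem.List.pyRange 0 ((cs.length : Int) - 1) 1).foldl
    (fun (st : Int × Int × Int) (i : Int) =>
      let c := PySem.List.pyGetD cs i ' '
      let lz := if c = '0' then st.1 + 1 else st.1
      let tr := if c = '0' then st.2.1 else st.2.1 - 1
      (lz, tr, max st.2.2 (lz + tr)))
    (0, (PySem.Str.count s "1" : Int), 0)
  st.2.2

-- ===== PORT B =====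
-- helper 'solve' of Source B; the 'length ≤ 1' guard is python's 'len(t) == 1' base case made total
-- (python never calls solve on an empty string).
def pvSolveB (t : List Char) : Int × Int :=
  if t.length ≤ 1 then
    let d : Int := if t = ['0'] then 1 else -1
    (d, d)
  else
    let mid := t.length / 2
    let lr := pvSolveB (PySem.List.slice t none (some (mid : Int)))
    let rr := pvSolveB (PySem.List.slice t (some (mid : Int)) none)
    (lr.1 + rr.1, max lr.2 (lr.1 + rr.2))
termination_by t.length
decreasing_by
  · simp only [PySem.List.slice_to_natCast, List.length_take]; omega
  · simp only [PySem.List.slice_from_natCast, List.length_drop]; omega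

def maxScore2_alt (s : String) : Int :=
  let cs := s.toList
  if cs.length < 2 then 0
  else
    let dm := pvSolveB (PySem.List.slice cs none (some (-1)))
    max 0 ((PySem.Str.count s "1" : Int) + dm.2)

-- ===== PRECONDITION & SPEC =====
def Spec_maxScore2 (s : String) (out : Int) : Prop := out = maxScore2_alt s
instance (s : String) (out : Int) : Decidable (Spec_maxScore2 s out) := by unfold Spec_maxScore2; infer_instance

-- ===== CLAIM (what is proved, stated in full; the proofs are below) =====
def Claim_equal_maxScore2 : Prop := ∀ (s : String), Dom_maxScore2 s → Spec_maxScore2 s (maxScore2 s)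

-- ===== LEMMAS AND PROOFS =====

-- number of '0' in the first k characters
def pvZ (cs : List Char) (k : Nat) : Int := ((cs.take k).countP (fun c => c = '0') : Int)
-- number of non-'0' in the first k characters
def pvN (cs : List Char) (k : Nat) : Int := ((cs.take k).countP (fun c => !(c = '0' : Bool)) : Int)
-- zeros minus non-zeros in the first k characters
def pvPre (cs : List Char) (k : Nat) : Int := pvZ cs k - pvN cs k
-- zeros minus non-zeros over the whole list
def pvDiff (cs : List Char) : Int :=
  ((cs.countP (fun c => c = '0') : Nat) : Int) - ((cs.countP (fun c => !(c = '0' : Bool)) : Nat) : Int)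
-- max of pvPre over prefix lengths 1..k+1
def pvM (cs : List Char) : Nat → Int
  | 0 => pvPre cs 1
  | k + 1 => max (pvM cs k) (pvPre cs (k + 2))

-- what A's loop computes (running max, with the initial 0)
def pvBest (cs : List Char) (t : Int) : Nat → Int
  | 0 => 0
  | k + 1 => max (pvBest cs t k) (pvZ cs (k + 1) + t - pvN cs (k + 1))

theorem pvA_loop (cs : List Char) (t : Int) (k : Nat) (hk : k ≤ cs.length) :
    (PySem.List.pyRange 0 (k : Int) 1).foldl
      (fun (st : Int × Int × Int) (i : Int) =>
        let c := PySem.List.pyGetD cs i ' '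
        let lz := if c = '0' then st.1 + 1 else st.1
        let tr := if c = '0' then st.2.1 else st.2.1 - 1
        (lz, tr, max st.2.2 (lz + tr)))
      (0, t, 0)
    = (pvZ cs k, t - pvN cs k, pvBest cs t k) := by
  induction k with
  | zero =>
    rw [show ((0:Nat):Int) = 0 by norm_num, PySem.List.pyRange_one_eq_nil (le_refl 0)]
    simp [pvZ, pvN, pvBest]
  | succ k ih =>
    have hk2 : k < cs.length := by omega
    have hcast : ((k + 1 : Nat) : Int) = (k : Int) + 1 := by push_cast; ring
    rw [hcast, PySem.List.pyRange_one_succ_right (by positivity), List.foldl_append, ih (by omega)]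
    simp only [List.foldl_cons, List.foldl_nil]
    have hget : PySem.List.pyGetD cs (k : Int) ' ' = cs[k] := by
      rw [PySem.List.pyGetD_natCast]
      exact List.getD_eq_getElem cs ' ' hk2
    have htake : cs.take (k + 1) = cs.take k ++ [cs[k]] :=
      List.take_succ_eq_append_getElem hk2
    have hcount : ∀ p : Char → Bool,
        (((cs.take (k + 1)).countP p : Nat) : Int)
          = ((cs.take k).countP p : Int) + (if p cs[k] then 1 else 0) := by
      intro p
      rw [htake, List.countP_append]
      push_cast [List.countP_cons, List.countP_nil]
      split_ifs <;> simp
    have hZs : pvZ cs (k + 1) = pvZ cs k + (if cs[k] = '0' then 1 else 0) := by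
      unfold pvZ
      rw [hcount]
      split_ifs with h1 h2 <;> simp_all
    have hNs : pvN cs (k + 1) = pvN cs k + (if cs[k] = '0' then 0 else 1) := by
      unfold pvN
      rw [hcount]
      split_ifs with h1 h2 <;> simp_all
    simp only [hget, pvBest, hZs, hNs, Prod.mk.injEq]
    split_ifs <;> refine ⟨by ring, by ring, ?_⟩ <;> congr 1 <;> ring

-- A's running max is the 0-floored shifted prefix max
theorem pvBest_eq_M (cs : List Char) (t : Int) (k : Nat) :
    pvBest cs t (k + 1) = max 0 (t + pvM cs k) := by
  induction k with
  | zero => simp [pvBest, pvM, pvPre]; omega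
  | succ k ih =>
    have : pvBest cs t (k + 1 + 1) = max (pvBest cs t (k + 1)) (pvZ cs (k + 2) + t - pvN cs (k + 2)) := rfl
    rw [this, ih]
    simp only [pvM, pvPre]
    omega

-- pvPre of a prefix within the left half
theorem pvPre_append_left (l r : List Char) (k : Nat) (hk : k ≤ l.length) :
    pvPre (l ++ r) k = pvPre l k := by
  simp [pvPre, pvZ, pvN, List.take_append_of_le_length hk]

-- pvPre of a prefix reaching into the right half

theorem pvPre_append_right (l r : List Char) (j : Nat) :
    pvPre (l ++ r) (l.length + j) = pvDiff l + pvPre r j := by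
  have h1 : (l ++ r).take (l.length + j) = l ++ r.take j := by
    rw [List.take_append]
    congr 1
    · exact List.take_of_length_le (by omega)
    · congr 1
      omega
  simp only [pvPre, pvZ, pvN, pvDiff, h1, List.countP_append]
  push_cast
  ring

theorem pvM_append_left (l r : List Char) (k : Nat) (hk : k + 1 <= l.length) :
    pvM (l ++ r) k = pvM l k := by
  induction k with
  | zero => simp [pvM, pvPre_append_left l r 1 (by omega)]
  | succ k ih =>
    simp only [pvM, ih (by omega), pvPre_append_left l r (k + 2) (by omega)]

theorem pvM_append (l r : List Char) (hl : 1 <= l.length) (j : Nat) :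
    pvM (l ++ r) (l.length - 1 + (j + 1)) = max (pvM l (l.length - 1)) (pvDiff l + pvM r j) := by
  induction j with
  | zero =>
    have hidx : l.length - 1 + (0 + 1) = (l.length - 1) + 1 := by omega
    rw [hidx]
    show max (pvM (l ++ r) (l.length - 1)) (pvPre (l ++ r) (l.length - 1 + 2)) = _
    rw [pvM_append_left l r (l.length - 1) (by omega),
      show l.length - 1 + 2 = l.length + 1 from by omega,
      pvPre_append_right l r 1]
    rfl
  | succ j ih =>
    have hidx : l.length - 1 + (j + 1 + 1) = (l.length - 1 + (j + 1)) + 1 := by omega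
    rw [hidx]
    show max (pvM (l ++ r) (l.length - 1 + (j + 1))) (pvPre (l ++ r) (l.length - 1 + (j + 1) + 2)) = _
    rw [ih, show l.length - 1 + (j + 1) + 2 = l.length + (j + 2) from by omega,
      pvPre_append_right l r (j + 2)]
    show _ = max (pvM l (l.length - 1)) (pvDiff l + max (pvM r j) (pvPre r (j + 2)))
    omega

-- B's divide-and-conquer helper computes (pvDiff, prefix max) on nonempty lists
theorem pvSolveB_spec (n : Nat) : ∀ (t : List Char), t.length = n → 1 <= n →
    pvSolveB t = (pvDiff t, pvM t (n - 1)) := by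
  induction n using Nat.strong_induction_on with
  | _ n ih =>
    intro t ht h1
    rw [pvSolveB]
    by_cases hle : t.length <= 1
    · rw [if_pos hle]
      obtain ⟨c, hc⟩ : ∃ c, t = [c] := by
        cases t with
        | nil => simp at ht; omega
        | cons c t' =>
          cases t' with
          | nil => exact ⟨c, rfl⟩
          | cons _ _ => simp at hle
      subst hc
      have hn : n = 1 := by simpa using ht.symm
      subst hn
      by_cases h0 : c = '0' <;> simp [h0, pvDiff, pvM, pvPre, pvZ, pvN]
    · rw [if_neg hle]
      have h2 : 2 <= t.length := by omega
      have hslL : PySem.List.slice t none (some ((t.length / 2 : Nat) : Int)) = t.take (t.length / 2) :=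
        PySem.List.slice_to_natCast t (t.length / 2)
      have hslR : PySem.List.slice t (some ((t.length / 2 : Nat) : Int)) none = t.drop (t.length / 2) :=
        PySem.List.slice_from_natCast t (t.length / 2)
      simp only [hslL, hslR]
      have hlenL : (t.take (t.length / 2)).length = t.length / 2 := by
        simp; omega
      have hlenR : (t.drop (t.length / 2)).length = t.length - t.length / 2 := by simp
      rw [ih (t.length / 2) (by omega) _ hlenL (by omega),
        ih (t.length - t.length / 2) (by omega) _ hlenR (by omega)]
      have happ : t.take (t.length / 2) ++ t.drop (t.length / 2) = t := List.take_append_drop _ t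
      have hdiff : pvDiff t = pvDiff (t.take (t.length / 2)) + pvDiff (t.drop (t.length / 2)) := by
        conv_lhs => rw [← happ]
        simp only [pvDiff, List.countP_append]
        push_cast
        ring
      have hM := pvM_append (t.take (t.length / 2)) (t.drop (t.length / 2))
        (by rw [hlenL]; omega) (t.length - t.length / 2 - 1)
      rw [happ, hlenL] at hM
      have hidx : t.length / 2 - 1 + (t.length - t.length / 2 - 1 + 1) = n - 1 := by omega
      rw [hidx] at hM
      simp only [Prod.mk.injEq]
      exact ⟨hdiff.symm, hM.symm⟩

-- pvM only looks at proper prefixes, so dropping the last character does not change it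
theorem pvPre_dropLast (cs : List Char) (j : Nat) (hj : j <= cs.length - 1) :
    pvPre cs.dropLast j = pvPre cs j := by
  have h : cs.dropLast.take j = cs.take j := by
    rw [List.dropLast_eq_take, List.take_take]
    congr 1
    omega
  simp [pvPre, pvZ, pvN, h]

theorem pvM_dropLast (cs : List Char) (k : Nat) (hk : k + 1 <= cs.length - 1) :
    pvM cs.dropLast k = pvM cs k := by
  induction k with
  | zero => simp [pvM, pvPre_dropLast cs 1 (by omega)]
  | succ k ih =>
    simp only [pvM, ih (by omega), pvPre_dropLast cs (k + 2) (by omega)]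

-- ===== VERDICT (by name: the statement is the Claim_ definition above) =====
theorem maxScore2_spec : Claim_equal_maxScore2 := by
  intro s _
  simp only [Spec_maxScore2, maxScore2, maxScore2_alt]
  by_cases h2 : s.toList.length < 2
  · rw [if_pos h2, PySem.List.pyRange_one_eq_nil (by omega : ((s.toList.length : Nat) : Int) - 1 <= 0)]
    rfl
  · rw [if_neg h2]
    have hA : ((s.toList.length : Nat) : Int) - 1 = ((s.toList.length - 1 : Nat) : Int) := by
      omega
    rw [hA, pvA_loop s.toList _ (s.toList.length - 1) (by omega)]
    have hsl : PySem.List.slice s.toList none (some (-1)) = s.toList.dropLast :=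
      PySem.List.slice_to_neg_one s.toList
    rw [hsl, pvSolveB_spec (s.toList.length - 1) s.toList.dropLast (by simp) (by omega)]
    have hk : s.toList.length - 1 = (s.toList.length - 2) + 1 := by omega
    rw [hk, pvBest_eq_M]
    simp only [Nat.add_sub_cancel]
    rw [pvM_dropLast s.toList (s.toList.length - 2) (by omega)]
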